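-- pv_equiv track=rewrite | github.com/amazon-braket/amazon-braket-default-simulator-python | test/integ_tests/circuits_test.py | _ghz_circuit
-- ===== SOURCE A (Python) =====
-- def _ghz_circuit(n_qubits, ghz_start, n_ghz, use_tree):
--     ops = []
--     ghz_qs = list(range(ghz_start, ghz_start + n_ghz))
--     for q in range(n_qubits):
--         if q not in ghz_qs:
--             ops.append(("i", [q]))
--     ops.append(("h", [ghz_qs[0]]))
--     if use_tree:
--         layer = [ghz_qs[0]]
--         idx = 1
--         while idx < len(ghz_qs):
--             next_layer = []
--             for ctrl in layer:
--                 if idx < len(ghz_qs):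
--                     ops.append(("cnot", [ctrl, ghz_qs[idx]]))
--                     next_layer.extend([ctrl, ghz_qs[idx]])
--                     idx += 1
--             layer = next_layer
--     else:
--         for i in range(1, len(ghz_qs)):
--             ops.append(("cnot", [ghz_qs[i - 1], ghz_qs[i]]))
--     return ops
-- ===== SOURCE B (Python) =====
-- def _ghz_circuit(n_qubits, ghz_start, n_ghz, use_tree):
--     lo = ghz_start
--     hi = lo + n_ghz
--     # identity ops decided by arithmetic bounds, no membership scan
--     ops = [("i", [q]) for q in range(n_qubits) if q < lo or q >= hi]
--     ops.append(("h", [lo]))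
--     if use_tree:
--         # closed form: the control of target lo+k is lo + (k stripped of
--         # trailing zeros, halved); no layer/queue state is kept at all
--         for k in range(1, n_ghz):
--             m = k
--             while m % 2 == 0:
--                 m //= 2
--             ops.append(("cnot", [lo + m // 2, lo + k]))
--     else:
--         ops.extend(("cnot", [lo + i - 1, lo + i]) for i in range(1, n_ghz))
--     return ops
-- ===== Notes on version B (the rewrite author's own statement) =====
-- stated objective: faster
-- what changed: The identity pass tests arithmetic range bounds instead of scanning ghz_qs for membership, and the tree branch keeps no layer/queue state at all: it emits the k-th CNOT directly from the closed form control = ghz_start + (k stripped of trailing zeros, halved), proved equal to A's level-by-level construction.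
import Mathlib
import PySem

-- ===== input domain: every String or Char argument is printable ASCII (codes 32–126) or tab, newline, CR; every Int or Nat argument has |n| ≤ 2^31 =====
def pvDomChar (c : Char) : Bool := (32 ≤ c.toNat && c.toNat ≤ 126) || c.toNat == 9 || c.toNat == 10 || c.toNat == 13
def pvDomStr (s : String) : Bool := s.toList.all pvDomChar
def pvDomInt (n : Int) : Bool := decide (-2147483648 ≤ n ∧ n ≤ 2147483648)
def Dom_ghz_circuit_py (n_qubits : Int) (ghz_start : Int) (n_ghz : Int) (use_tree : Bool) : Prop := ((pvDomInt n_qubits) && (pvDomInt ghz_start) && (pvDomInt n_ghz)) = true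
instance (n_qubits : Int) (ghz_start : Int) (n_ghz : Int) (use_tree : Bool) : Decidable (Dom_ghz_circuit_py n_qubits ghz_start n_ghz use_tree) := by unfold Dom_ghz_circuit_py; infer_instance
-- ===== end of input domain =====

-- B replaces A's membership scan by arithmetic bounds and A's stateful level-by-level tree
-- construction by a stateless per-target closed form for the control qubit (objective: faster).

-- ===== PORT A =====
-- A's tree branch: outer 'while idx < len(ghz_qs)' over levels, inner 'for ctrl in layer'.
-- Defunctionalized: the cons case is one inner-loop step, the nil case is the level change
-- (layer := next_layer) guarded by the outer while condition.  'fuel' bounds the number of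
-- level changes only (a totality guard; gs.length + 1 is always enough on reachable states).
def ghzTreeA (gs : List Int) (fuel : Nat) (layer next : List Int) (idx : Nat)
    (ops : List (String × List Int)) : List (String × List Int) :=
  match layer with
  | [] =>
      if idx < gs.length then
        match fuel with
        | 0 => ops
        | f + 1 => ghzTreeA gs f next [] idx ops
      else ops
  | c :: rest =>
      if idx < gs.length then
        ghzTreeA gs fuel rest (next ++ [c, gs.getD idx 0]) (idx + 1)
          (ops ++ [("cnot", [c, gs.getD idx 0])])
      else ghzTreeA gs fuel rest next idx ops
termination_by (fuel, layer.length)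

def ghz_circuit_py (n_qubits : Int) (ghz_start : Int) (n_ghz : Int) (use_tree : Bool) :
    List (String × List Int) :=
  let gs := PySem.List.pyRange ghz_start (ghz_start + n_ghz) 1
  let ops := (PySem.List.pyRange 0 n_qubits 1).foldl
      (fun acc q => if gs.contains q then acc else acc ++ [("i", [q])]) []
  match gs with
  | [] => []   -- ghz_qs[0] raises IndexError in Python here; excluded by Pre_
  | g0 :: _ =>
      let ops := ops ++ [("h", [g0])]
      if use_tree then
        ghzTreeA gs (gs.length + 1) [g0] [] 1 ops
      else
        (PySem.List.pyRange 1 (gs.length : Int) 1).foldl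
          (fun acc i => acc ++ [("cnot",
            [PySem.List.pyGetD gs (i - 1) 0, PySem.List.pyGetD gs i 0])]) ops

-- ===== PORT B =====
-- Source B's inner 'while m % 2 == 0: m //= 2' followed by 'm // 2'; the 'm = 0' branch is a
-- totality guard only (Source B calls it with k ≥ 1, where the Python loop terminates).
def treeCtrl (m : Nat) : Nat :=
  if m = 0 then 0
  else if m % 2 = 0 then treeCtrl (m / 2) else m / 2
termination_by m
decreasing_by omega

def ghz_circuit_py_alt (n_qubits : Int) (ghz_start : Int) (n_ghz : Int) (use_tree : Bool) :
    List (String × List Int) :=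
  let lo := ghz_start
  let hi := ghz_start + n_ghz
  let ops := (PySem.List.pyRange 0 n_qubits 1).foldl
      (fun acc q => if q < lo ∨ hi ≤ q then acc ++ [("i", [q])] else acc) []
  let ops := ops ++ [("h", [lo])]
  if use_tree then
    (PySem.List.pyRange 1 n_ghz 1).foldl
      (fun acc k => acc ++ [("cnot", [lo + (treeCtrl k.toNat : Int), lo + k])]) ops
  else
    (PySem.List.pyRange 1 n_ghz 1).foldl
      (fun acc i => acc ++ [("cnot", [lo + i - 1, lo + i])]) ops

-- ===== PRECONDITION & SPEC =====
-- Pre_ excludes n_ghz ≤ 0, on which A raises IndexError at ghz_qs[0] (empty GHZ register).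
def Pre_ghz_circuit_py (n_qubits : Int) (ghz_start : Int) (n_ghz : Int) (use_tree : Bool) : Prop :=
  1 ≤ n_ghz
instance (n_qubits : Int) (ghz_start : Int) (n_ghz : Int) (use_tree : Bool) :
    Decidable (Pre_ghz_circuit_py n_qubits ghz_start n_ghz use_tree) := by
  unfold Pre_ghz_circuit_py; infer_instance

def pvWitness_ghz_circuit_py : Int × Int × Int × Bool := (5, 1, 3, true)

def Spec_ghz_circuit_py (n_qubits : Int) (ghz_start : Int) (n_ghz : Int) (use_tree : Bool)
    (out : List (String × List Int)) : Prop :=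
  out = ghz_circuit_py_alt n_qubits ghz_start n_ghz use_tree
instance (n_qubits : Int) (ghz_start : Int) (n_ghz : Int) (use_tree : Bool)
    (out : List (String × List Int)) :
    Decidable (Spec_ghz_circuit_py n_qubits ghz_start n_ghz use_tree out) := by
  unfold Spec_ghz_circuit_py; infer_instance

-- ===== CLAIM (what is proved, stated in full; the proofs are below) =====
def Claim_equal_ghz_circuit_py : Prop := ∀ (n_qubits : Int) (ghz_start : Int) (n_ghz : Int) (use_tree : Bool), Dom_ghz_circuit_py n_qubits ghz_start n_ghz use_tree → Pre_ghz_circuit_py n_qubits ghz_start n_ghz use_tree → Spec_ghz_circuit_py n_qubits ghz_start n_ghz use_tree (ghz_circuit_py n_qubits ghz_start n_ghz use_tree)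

-- ===== LEMMAS AND PROOFS =====

theorem treeCtrl_two_mul (m : Nat) : treeCtrl (2 * m) = treeCtrl m := by
  rcases Nat.eq_zero_or_pos m with h | h
  · subst h; rfl
  · rw [treeCtrl, if_neg (by omega : ¬ 2 * m = 0),
      if_pos (Nat.mul_mod_right 2 m), Nat.mul_div_cancel_left m (by norm_num : 0 < 2)]

theorem treeCtrl_two_mul_add_one (m : Nat) : treeCtrl (2 * m + 1) = m := by
  rw [treeCtrl, if_neg (by omega : ¬ 2 * m + 1 = 0),
    if_neg (by omega : ¬ (2 * m + 1) % 2 = 0)]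
  omega

-- When idx is already past the register, A's inner loop only skims the rest of the layer.
theorem ghzTreeA_skim (gs : List Int) (f : Nat) (layer : List Int) :
    ∀ (next : List Int) (idx : Nat) (ops : List (String × List Int)),
      gs.length ≤ idx → ghzTreeA gs f layer next idx ops = ops := by
  induction layer with
  | nil => intro next idx ops h; unfold ghzTreeA; simp [Nat.not_lt.mpr h]
  | cons c rest ih => intro next idx ops h; unfold ghzTreeA; simp [Nat.not_lt.mpr h]; exact ih _ _ _ h

-- The core correspondence: on reachable states the pending layer ++ next_layer holds exactly
-- the closed-form controls of the upcoming targets idx, idx+1, …, idx+idx-1, so the whole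
-- tree run emits the closed-form op for each remaining target in order.
theorem ghzTreeA_closed (gs : List Int) (lo : Int)
    (hget : ∀ k : Nat, k < gs.length → gs.getD k 0 = lo + k) :
    ∀ (f : Nat) (layer next : List Int) (idx : Nat) (ops : List (String × List Int)),
      1 ≤ idx →
      layer ++ next = (List.range idx).map (fun i => lo + (treeCtrl (idx + i) : Int)) →
      (layer ≠ [] → gs.length - idx ≤ f) →
      (layer = [] → gs.length - idx + 1 ≤ f) →
      ghzTreeA gs f layer next idx ops
        = ops ++ (List.range (gs.length - idx)).map
            (fun j => ("cnot", [lo + (treeCtrl (idx + j) : Int), lo + ((idx + j : Nat) : Int)])) := by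
  intro f
  induction f with
  | zero =>
      intro layer next idx ops hidx hinv h1 h2
      have hge : gs.length ≤ idx := by
        cases layer with
        | nil => have := h2 rfl; omega
        | cons c rest => have := h1 (by simp); omega
      rw [ghzTreeA_skim gs 0 layer next idx ops hge]
      simp [Nat.sub_eq_zero_of_le hge]
  | succ f ihf =>
      intro layer
      induction layer with
      | nil =>
          intro next idx ops hidx hinv h1 h2
          unfold ghzTreeA
          by_cases hlt : idx < gs.length
          · rw [if_pos hlt]
            have hf2 : gs.length - idx + 1 ≤ f + 1 := h2 rfl
            refine ihf next [] idx ops hidx (by simpa using hinv)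
              (fun _ => by omega) (fun h => ?_)
            subst h
            simp only [List.nil_append] at hinv
            have : idx = 0 := by
              by_contra hne
              have : (List.range idx).map (fun i => lo + (treeCtrl (idx + i) : Int)) ≠ [] := by
                simp [List.range_eq_nil, hne]
              exact this hinv.symm
            omega
          · simp [hlt, Nat.sub_eq_zero_of_le (Nat.le_of_not_lt hlt)]
      | cons c rest ihr =>
          intro next idx ops hidx hinv h1 h2
          unfold ghzTreeA
          by_cases hlt : idx < gs.length
          · rw [if_pos hlt]
            have hf1 : gs.length - idx ≤ f + 1 := h1 (by simp)
            obtain ⟨j, rfl⟩ : ∃ j, idx = j + 1 := ⟨idx - 1, by omega⟩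
            have hrange : List.range (j + 1) = 0 :: (List.range j).map (· + 1) := by
              simp [List.range_succ_eq_map]
            rw [hrange] at hinv
            simp only [List.map_cons, List.map_map] at hinv
            have hc : c = lo + (treeCtrl (j + 1) : Int) := by
              have := congrArg (fun l => l.headI) hinv
              simpa using this
            have htail : rest ++ next =
                (List.range j).map (fun i => lo + (treeCtrl (j + 2 + i) : Int)) := by
              have ht := congrArg (fun l => l.tail) hinv
              simp only [List.cons_append, List.tail_cons] at ht
              rw [ht]
              apply List.map_congr_left
              intro i _
              simp only [Function.comp]
              have he : j + 1 + (i + 1) = j + 2 + i := by omega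
              rw [he]
            have hgd : gs.getD (j + 1) 0 = lo + ((j + 1 : Nat) : Int) := hget (j + 1) hlt
            have hinv' : rest ++ (next ++ [c, gs.getD (j + 1) 0]) =
                (List.range (j + 1 + 1)).map (fun i => lo + (treeCtrl (j + 1 + 1 + i) : Int)) := by
              rw [List.range_succ, List.range_succ, List.map_append, List.map_append]
              simp only [List.map_cons, List.map_nil]
              have e1 : j + 1 + 1 + j = 2 * (j + 1) := by omega
              have e2 : j + 1 + 1 + (j + 1) = 2 * (j + 1) + 1 := by omega
              rw [e1, e2, treeCtrl_two_mul, treeCtrl_two_mul_add_one, hgd, ← hc]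
              have he : (j + 1 + 1 : Nat) = j + 2 := by omega
              rw [he, ← htail]
              simp
            have hrec := ihr (next ++ [c, gs.getD (j + 1) 0]) (j + 1 + 1)
              (ops ++ [("cnot", [c, gs.getD (j + 1) 0])]) (by omega) hinv'
              (fun _ => by omega) (fun _ => by omega)
            rw [hrec]
            -- reassemble: first emitted op + remaining closed-form ops = all closed-form ops
            have hlen : gs.length - (j + 1) = (gs.length - (j + 1 + 1)) + 1 := by omega
            rw [hlen, List.range_succ_eq_map]
            simp only [List.map_cons, List.map_map, List.append_assoc, List.cons_append,
              List.nil_append, Nat.add_zero]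
            rw [hc, hgd]
            congr 2
            apply List.map_congr_left
            intro i _
            simp only [Function.comp]
            have e3 : j + 1 + (i + 1) = j + 1 + 1 + i := by omega
            rw [e3]
          · rw [if_neg hlt]
            rw [ghzTreeA_skim gs (f + 1) rest next idx ops (Nat.le_of_not_lt hlt)]
            simp [Nat.sub_eq_zero_of_le (Nat.le_of_not_lt hlt)]

-- ===== VERDICT (by name: the statement is the Claim_ definition above) =====
set_option maxHeartbeats 1000000 in
theorem ghz_circuit_py_spec : Claim_equal_ghz_circuit_py := by
  intro n_qubits ghz_start n_ghz use_tree _ hpre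
  have hn : 1 ≤ n_ghz := hpre
  unfold Spec_ghz_circuit_py ghz_circuit_py ghz_circuit_py_alt
  set gs := PySem.List.pyRange ghz_start (ghz_start + n_ghz) 1 with hgs
  have hlen : (gs.length : Int) = n_ghz := by
    rw [hgs, PySem.List.length_pyRange_one]; omega
  have hget : ∀ k : Nat, k < gs.length → gs.getD k 0 = ghz_start + k := by
    intro k hk
    rw [List.getD_eq_getElem _ _ hk]
    simp [hgs, PySem.List.getElem_pyRange_one]
  have hcons : gs = ghz_start :: PySem.List.pyRange (ghz_start + 1) (ghz_start + n_ghz) 1 := by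
    rw [hgs, PySem.List.pyRange_one_cons (by omega)]
  -- the identity prefix: membership in a contiguous range = arithmetic bounds
  have hid : (PySem.List.pyRange 0 n_qubits 1).foldl
      (fun acc q => if gs.contains q then acc else acc ++ [("i", [q])])
        ([] : List (String × List Int))
      = (PySem.List.pyRange 0 n_qubits 1).foldl
      (fun acc q => if q < ghz_start ∨ ghz_start + n_ghz ≤ q then acc ++ [("i", [q])] else acc) [] := by
    apply PySem.List.foldl_congr_mem
    intro acc q _
    have hmem : gs.contains q = decide (ghz_start ≤ q ∧ q < ghz_start + n_ghz) := by
      simp [hgs, PySem.List.mem_pyRange_one]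
    rw [hmem]
    by_cases h : ghz_start ≤ q ∧ q < ghz_start + n_ghz
    · simp [h]
    · simp [h]
  rw [hcons]
  simp only []
  rw [← hcons, hid]
  set ops0 := ((PySem.List.pyRange 0 n_qubits 1).foldl
      (fun acc q => if q < ghz_start ∨ ghz_start + n_ghz ≤ q then acc ++ [("i", [q])] else acc)
        ([] : List (String × List Int))) ++ [("h", [ghz_start])]
  cases use_tree with
  | true =>
      simp only [if_true]
      have t1 : treeCtrl 1 = 0 := by rw [treeCtrl]; norm_num
      have hinit : ([ghz_start] : List Int) ++ [] =
          (List.range 1).map (fun i => ghz_start + (treeCtrl (1 + i) : Int)) := by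
        simp [List.range_succ, t1]
      rw [ghzTreeA_closed gs ghz_start hget (gs.length + 1) [ghz_start] [] 1 ops0
        (by omega) hinit (fun _ => by omega) (by simp)]
      rw [PySem.List.foldl_append_singleton_eq_map, PySem.List.pyRange_one]
      have hlr : (n_ghz - 1).toNat = gs.length - 1 := by omega
      rw [← hlr]
      rw [List.map_map]
      apply congrArg
      apply List.map_congr_left
      intro j hj
      simp only [Function.comp]
      have hjt : ((1 : Int) + j).toNat = 1 + j := by omega
      rw [hjt]
      push_cast
      rfl
  | false =>
      simp only [Bool.false_eq_true, if_false]
      rw [hlen]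
      apply PySem.List.foldl_congr_mem
      intro acc i hi
      rw [PySem.List.mem_pyRange_one] at hi
      have h1 : PySem.List.pyGetD gs i 0 = ghz_start + i := by
        rw [PySem.List.pyGetD_eq_getElem gs 0 (show (0:Int) ≤ i by omega) (show i < (gs.length:Int) by omega),
          ← List.getD_eq_getElem _ 0, hget i.toNat (by omega)]
        omega
      have h2 : PySem.List.pyGetD gs (i - 1) 0 = ghz_start + i - 1 := by
        rw [PySem.List.pyGetD_eq_getElem gs 0 (show (0:Int) ≤ i - 1 by omega) (show i - 1 < (gs.length:Int) by omega),
          ← List.getD_eq_getElem _ 0, hget (i - 1).toNat (by omega)]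
        omega
      rw [h1, h2]
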